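-- pv_equiv track=rewrite | github.com/cristihainic/topcoder | PrefixCode.py | isOne
-- ===== SOURCE A (Python) =====
-- def isOne(words):
--
--     word_index = []
--
--     for i in words:
--         for j in words:
--             if i != j:
--                 if j.startswith(i):
--                     word_index.append(words.index(i))
--
--     if word_index:
--         return "No, {}".format(min(word_index))
--     else:
--         return "Yes"
-- ===== SOURCE B (Python) =====
-- def isOne(words):
--     distinct = set(words)
--
--     def bad(w):
--         return any(v != w and v.startswith(w) for v in distinct)
--
--     for idx, w in enumerate(words):
--         if bad(w):
--             return "No, {}".format(idx)
--     return "Yes"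
-- ===== Notes on version B (the rewrite author's own statement) =====
-- stated objective: faster
-- what changed: B replaces A's nested value-loops with repeated list.index calls and a collected index list by a single indexed scan that early-returns at the first word that prefixes another distinct word, checking against a set built once.
import Mathlib
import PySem

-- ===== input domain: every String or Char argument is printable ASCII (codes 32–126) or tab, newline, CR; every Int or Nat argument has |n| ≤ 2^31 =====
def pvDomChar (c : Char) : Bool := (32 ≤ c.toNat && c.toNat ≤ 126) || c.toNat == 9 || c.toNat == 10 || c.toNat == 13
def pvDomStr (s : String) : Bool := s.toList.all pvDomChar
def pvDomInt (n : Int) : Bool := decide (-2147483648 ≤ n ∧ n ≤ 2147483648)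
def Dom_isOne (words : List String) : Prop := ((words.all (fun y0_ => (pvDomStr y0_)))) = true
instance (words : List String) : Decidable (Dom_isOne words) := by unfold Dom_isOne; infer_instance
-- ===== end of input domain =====

-- B replaces A's nested value-loops + repeated list.index by one indexed scan with early return
-- over a set built once.

-- ===== PORT A =====
-- words.index(i) always succeeds here (i ∈ words), so `.getD 0` is never taken.
def isOne (words : List String) : String :=
  let word_index : List Int :=
    words.foldl (fun acc i =>
      words.foldl (fun acc j =>
        if i ≠ j then
          if PySem.Str.startswith j i then
            acc ++ [(((PySem.List.index? words i).getD 0 : Nat) : Int)]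
          else acc
        else acc) acc) []
  if word_index ≠ [] then
    "No, " ++ PySem.Int.toStr ((PySem.List.min? word_index (fun x => x)).getD 0)
  else
    "Yes"

-- ===== PORT B =====
-- Source B's inner helper `bad(w)`: does some other distinct word start with w?
def pvBad (distinct : List String) (w : String) : Bool :=
  distinct.any (fun v => v ≠ w && PySem.Str.startswith v w)

-- Source B's for-loop over enumerate(words) with early return
def isOneAltGo (distinct : List String) (idx : Int) : List String → String
  | [] => "Yes"
  | w :: rest =>
      if pvBad distinct w then
        "No, " ++ PySem.Int.toStr idx
      else
        isOneAltGo distinct (idx + 1) rest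

def isOne_alt (words : List String) : String :=
  isOneAltGo (PySem.Set.ofList words) 0 words

-- ===== PRECONDITION & SPEC =====
def Spec_isOne (words : List String) (out : String) : Prop := out = isOne_alt words
instance (words : List String) (out : String) : Decidable (Spec_isOne words out) := by unfold Spec_isOne; infer_instance

-- ===== CLAIM (what is proved, stated in full; the proofs are below) =====
def Claim_equal_isOne : Prop := ∀ (words : List String), Dom_isOne words → Spec_isOne words (isOne words)

-- ===== LEMMAS AND PROOFS =====

theorem pvBad_iff (words : List String) (w : String) :
    pvBad (PySem.Set.ofList words) w = true ↔
      ∃ v ∈ words, v ≠ w ∧ PySem.Str.startswith v w = true := by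
  simp [pvBad, List.any_eq_true, PySem.Set.mem_ofList]

-- A's appended value for word i
def pvIdx (words : List String) (i : String) : Int :=
  (((PySem.List.index? words i).getD 0 : Nat) : Int)

-- A's inner-loop contribution for word i
def pvG (words : List String) (i : String) : List Int :=
  (words.filter (fun j => decide (i ≠ j) && PySem.Str.startswith j i)).map (fun _ => pvIdx words i)

theorem inner_fold_eq (words : List String) (i : String) (acc : List Int) :
    words.foldl (fun acc j =>
        if i ≠ j then
          if PySem.Str.startswith j i then
            acc ++ [(((PySem.List.index? words i).getD 0 : Nat) : Int)]
          else acc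
        else acc) acc = acc ++ pvG words i := by
  have hf : (fun (acc : List Int) j =>
        if i ≠ j then
          if PySem.Str.startswith j i then
            acc ++ [(((PySem.List.index? words i).getD 0 : Nat) : Int)]
          else acc
        else acc)
      = (fun (acc : List Int) j =>
          if (decide (i ≠ j) && PySem.Str.startswith j i) then acc ++ [pvIdx words i] else acc) := by
    funext acc j
    by_cases h1 : i = j <;> by_cases h2 : PySem.Str.startswith j i = true <;>
      simp [h1, pvIdx]
  rw [hf, PySem.List.foldl_append_if]
  rfl

theorem word_index_eq (words : List String) :
    words.foldl (fun acc i =>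
      words.foldl (fun acc j =>
        if i ≠ j then
          if PySem.Str.startswith j i then
            acc ++ [(((PySem.List.index? words i).getD 0 : Nat) : Int)]
          else acc
        else acc) acc) ([] : List Int) = words.flatMap (pvG words) := by
  have hf : (fun (acc : List Int) i =>
      words.foldl (fun acc j =>
        if i ≠ j then
          if PySem.Str.startswith j i then
            acc ++ [(((PySem.List.index? words i).getD 0 : Nat) : Int)]
          else acc
        else acc) acc) = (fun (acc : List Int) i => acc ++ pvG words i) := by
    funext acc i; exact inner_fold_eq words i acc
  rw [hf, PySem.List.foldl_append_eq_flatMap]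
  rfl

theorem mem_word_index (words : List String) (x : Int) :
    x ∈ words.flatMap (pvG words) ↔
      ∃ i ∈ words, pvBad (PySem.Set.ofList words) i = true ∧ x = pvIdx words i := by
  simp only [List.mem_flatMap, pvG, List.mem_map, List.mem_filter, Bool.and_eq_true,
    decide_eq_true_eq]
  constructor
  · rintro ⟨i, hi, j, ⟨⟨hj, hne, hsw⟩, rfl⟩⟩
    exact ⟨i, hi, (pvBad_iff words i).mpr ⟨j, hj, fun h => hne h.symm, hsw⟩, rfl⟩
  · rintro ⟨i, hi, hb, rfl⟩
    obtain ⟨v, hv, hne, hsw⟩ := (pvBad_iff words i).mp hb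
    exact ⟨i, hi, v, ⟨⟨hv, fun h => hne h.symm, hsw⟩, rfl⟩⟩

theorem pvIdx_spec (words : List String) (i : String) (hi : i ∈ words) :
    ∃ (k : Nat) (hk : k < words.length),
      pvIdx words i = (k : Int) ∧ words[k] = i ∧ ∀ j (hj : j < k), words[j]'(hj.trans hk) ≠ i := by
  obtain ⟨k, hk⟩ := Option.isSome_iff_exists.mp ((PySem.List.index?_isSome_iff words i).mpr hi)
  obtain ⟨hlt, hget, hmin⟩ := PySem.List.getElem_of_index?_eq_some hk
  exact ⟨k, hlt, by unfold pvIdx; rw [hk]; rfl, hget, hmin⟩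

-- B's scan, characterized
theorem altGo_yes (s : List String) (l : List String) (idx : Int)
    (h : ∀ w ∈ l, pvBad s w = false) :
    isOneAltGo s idx l = "Yes" := by
  induction l generalizing idx with
  | nil => rfl
  | cons w rest ih =>
      rw [isOneAltGo,
        if_neg (by rw [h w (List.mem_cons_self)]; exact Bool.false_ne_true)]
      exact ih _ (fun w' hw' => h w' (List.mem_cons_of_mem _ hw'))

theorem altGo_no (s : List String) (l : List String) (idx : Int)
    (h : ∃ w ∈ l, pvBad s w = true) :
    isOneAltGo s idx l = "No, " ++ PySem.Int.toStr (idx + (l.findIdx (pvBad s) : Int)) := by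
  induction l generalizing idx with
  | nil => simp at h
  | cons w rest ih =>
      by_cases hw : pvBad s w = true
      · rw [isOneAltGo, if_pos hw]
        simp [List.findIdx_cons, hw]
      · have hrest : ∃ w ∈ rest, pvBad s w = true := by
          rcases h with ⟨w', hw', hb⟩
          rcases List.mem_cons.mp hw' with rfl | hm
          · exact absurd hb hw
          · exact ⟨w', hm, hb⟩
        rw [isOneAltGo, if_neg hw, ih _ hrest]
        simp only [List.findIdx_cons, Bool.eq_false_iff.mpr hw, cond_false]
        congr 2
        push_cast
        ring

-- ===== VERDICT (by name: the statement is the Claim_ definition above) =====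
theorem isOne_spec : Claim_equal_isOne := by
  intro words _
  unfold Spec_isOne isOne isOne_alt
  simp only [word_index_eq words]
  by_cases hex : ∃ w ∈ words, pvBad (PySem.Set.ofList words) w = true
  · -- some word is a prefix of another distinct word
    have hFlt : words.findIdx (pvBad (PySem.Set.ofList words)) < words.length :=
      List.findIdx_lt_length.mpr hex
    set F : Nat := words.findIdx (pvBad (PySem.Set.ofList words)) with hF
    have hPF : pvBad (PySem.Set.ofList words) (words[F]'hFlt) = true := List.findIdx_getElem
    -- (F : Int) is in the word_index list
    have hFmem : (F : Int) ∈ words.flatMap (pvG words) := by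
      rw [mem_word_index]
      refine ⟨words[F]'hFlt, List.getElem_mem _, hPF, ?_⟩
      obtain ⟨k, hk, hkval, hkget, hkmin⟩ := pvIdx_spec words (words[F]'hFlt) (List.getElem_mem _)
      have hkF : k = F := by
        have h1 : ¬ F < k := fun hlt => hkmin F hlt rfl
        have h2 : ¬ k < F := by
          intro hlt
          have hfalse := List.not_of_lt_findIdx (p := pvBad (PySem.Set.ofList words))
            (xs := words) (hF ▸ hlt)
          exact Bool.false_ne_true (hfalse.symm.trans ((congrArg _ hkget).trans hPF))
        omega
      rw [hkval, hkF]
    -- every member of word_index is ≥ F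
    have hFmin : ∀ x ∈ words.flatMap (pvG words), (F : Int) ≤ x := by
      intro x hx
      obtain ⟨i, hi, hbad, rfl⟩ := (mem_word_index words x).mp hx
      obtain ⟨k, hk, hkval, hkget, _⟩ := pvIdx_spec words i hi
      have : ¬ k < F := by
        intro hlt
        have hfalse := List.not_of_lt_findIdx (p := pvBad (PySem.Set.ofList words))
          (xs := words) (hF ▸ hlt)
        exact Bool.false_ne_true (hfalse.symm.trans ((congrArg _ hkget).trans hbad))
      rw [hkval]
      omega
    have hne : words.flatMap (pvG words) ≠ [] := fun h => by
      rw [h] at hFmem; exact absurd hFmem (List.not_mem_nil)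
    rw [if_pos hne]
    -- the min is exactly F
    obtain ⟨m, hm⟩ : ∃ m, PySem.List.min? (words.flatMap (pvG words)) (fun x => x) = some m := by
      cases hmm : PySem.List.min? (words.flatMap (pvG words)) (fun x => x) with
      | none => exact absurd ((PySem.List.min?_eq_none_iff _ _).mp hmm) hne
      | some m => exact ⟨m, rfl⟩
    have hmF : m = (F : Int) := by
      have h1 : (F : Int) ≤ m := hFmin m (PySem.List.min?_mem hm)
      have h2 : m ≤ (F : Int) := PySem.List.min?_isMin hm _ hFmem
      omega
    rw [hm, altGo_no _ _ _ hex]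
    congr 2
    rw [← hF]
    simp [hmF]
  · -- no word is a prefix of another distinct word
    have hall : ∀ w ∈ words, pvBad (PySem.Set.ofList words) w = false := by
      push Not at hex
      intro w hw
      simpa using hex w hw
    have hnil : words.flatMap (pvG words) = [] := by
      rcases h : words.flatMap (pvG words) with _ | ⟨x, t⟩
      · rfl
      · exfalso
        have hxmem : x ∈ words.flatMap (pvG words) := by rw [h]; simp
        obtain ⟨i, hi, hbad, _⟩ := (mem_word_index words x).mp hxmem
        rw [hall i hi] at hbad
        exact Bool.false_ne_true hbad
    rw [hnil, if_neg (by simp)]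
    exact (altGo_yes _ _ _ hall).symm
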